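-- pv_equiv track=rewrite | github.com/RodneyRichardson/AdventOfCode | 2022/aoc_2022_3.py | part2
-- ===== SOURCE A (Python) =====
-- def get_priority(item):
--     if item.islower():
--         priority = ord(item) - ord('a') + 1
--     else:
--         priority = ord(item) - ord('A') + 27
--     return priority
--
-- def part2(data):
--     """Solve part 2."""
--     badges = []
--     for i in range(0, len(data), 3):
--         rucksack1 = set(data[i])
--         rucksack2 = set(data[i+1])
--         rucksack3 = set(data[i+2])
--         badges.extend(rucksack1.intersection(rucksack2).intersection(rucksack3))
--     score = sum(get_priority(badge) for badge in badges)
--     return score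
-- ===== SOURCE B (Python) =====
-- def get_priority(item):
--     if item.islower():
--         priority = ord(item) - ord('a') + 1
--     else:
--         priority = ord(item) - ord('A') + 27
--     return priority
--
--
-- def part2(data):
--     """Solve part 2 via a frequency table: count in how many of the three
--     rucksacks each item occurs and keep the items occurring in all three,
--     accumulating the score directly instead of collecting a badges list."""
--     score = 0
--     for i in range(0, len(data), 3):
--         counts = {}
--         for c in [*set(data[i]), *set(data[i + 1]), *set(data[i + 2])]:
--             counts[c] = counts.get(c, 0) + 1
--         for c, n in counts.items():
--             if n == 3:
--                 score += get_priority(c)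
--     return score
-- ===== Notes on version B (the rewrite author's own statement) =====
-- stated objective: alternative
-- what changed: Replaces the chained set.intersection calls and the shared badges list with a per-triple frequency table (a dict counting in how many of the three character sets each item occurs), keeping items whose count is exactly 3 and adding their priorities straight into the running score.
import Mathlib
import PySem

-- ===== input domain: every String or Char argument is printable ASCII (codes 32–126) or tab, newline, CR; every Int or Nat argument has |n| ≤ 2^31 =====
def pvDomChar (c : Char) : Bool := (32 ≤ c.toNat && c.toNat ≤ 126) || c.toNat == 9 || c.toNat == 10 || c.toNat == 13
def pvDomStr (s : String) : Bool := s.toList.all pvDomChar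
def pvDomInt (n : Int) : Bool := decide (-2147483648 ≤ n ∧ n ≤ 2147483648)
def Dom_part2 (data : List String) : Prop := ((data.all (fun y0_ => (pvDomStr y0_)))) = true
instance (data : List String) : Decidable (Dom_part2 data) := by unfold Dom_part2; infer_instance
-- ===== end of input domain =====

-- B replaces the chained set intersections and the badges list with a per-triple
-- frequency table (count-then-threshold) accumulating the score directly (alternative, not faster).

-- ===== PORT A =====
def get_priority (item : Char) : Int :=
  if PySem.Chars.islower item then (item.toNat : Int) - ('a'.toNat : Int) + 1
  else (item.toNat : Int) - ('A'.toNat : Int) + 27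

def part2 (data : List String) : Int :=
  -- data[i] etc. are total here via getD ""; Pre_part2 excludes the IndexError inputs
  let badges := (PySem.List.pyRange 0 (data.length : Int) 3).foldl (fun acc i =>
    let rucksack1 : PySem.Set Char := PySem.Set.ofList (PySem.List.pyGetD data i "").toList
    let rucksack2 : PySem.Set Char := PySem.Set.ofList (PySem.List.pyGetD data (i+1) "").toList
    let rucksack3 : PySem.Set Char := PySem.Set.ofList (PySem.List.pyGetD data (i+2) "").toList
    acc ++ PySem.Set.inter (PySem.Set.inter rucksack1 rucksack2) rucksack3) []
  (badges.map get_priority).sum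

-- ===== PORT B =====
def part2_alt (data : List String) : Int :=
  (PySem.List.pyRange 0 (data.length : Int) 3).foldl (fun score i =>
    let s1 : PySem.Set Char := PySem.Set.ofList (PySem.List.pyGetD data i "").toList
    let s2 : PySem.Set Char := PySem.Set.ofList (PySem.List.pyGetD data (i+1) "").toList
    let s3 : PySem.Set Char := PySem.Set.ofList (PySem.List.pyGetD data (i+2) "").toList
    let counts : PySem.Dict Char Int :=
      (s1 ++ s2 ++ s3).foldl (fun d c => d.insert c (d.getD c 0 + 1)) PySem.Dict.empty
    counts.items.foldl (fun sc p => if p.2 == 3 then sc + get_priority p.1 else sc) score) 0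

-- ===== PRECONDITION & SPEC =====
-- Pre_ excludes lists whose length is not a multiple of 3: there data[i+1]/data[i+2] raises IndexError.
def Pre_part2 (data : List String) : Prop := data.length % 3 = 0
instance (data : List String) : Decidable (Pre_part2 data) := by unfold Pre_part2; infer_instance
def pvWitness_part2 : List String := ["abc", "cde", "ecf"]

def Spec_part2 (data : List String) (out : Int) : Prop := out = part2_alt data
instance (data : List String) (out : Int) : Decidable (Spec_part2 data out) := by unfold Spec_part2; infer_instance

-- ===== CLAIM (what is proved, stated in full; the proofs are below) =====
def Claim_equal_part2 : Prop := ∀ (data : List String), Dom_part2 data → Pre_part2 data → Spec_part2 data (part2 data)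

-- ===== LEMMAS AND PROOFS =====

-- inner score loop of B = filter-then-sum over the items list
theorem foldl_if_add (l : List (Char × Int)) (s : Int) :
    l.foldl (fun sc p => if p.2 == 3 then sc + get_priority p.1 else sc) s
      = s + ((l.filter (fun p => p.2 == 3)).map (fun p => get_priority p.1)).sum := by
  induction l generalizing s with
  | nil => simp
  | cons p t ih =>
    rw [List.foldl_cons, ih, List.filter_cons]
    by_cases h : p.2 == 3 <;> simp only [h, if_true, if_false, Bool.false_eq_true,
      List.map_cons, List.sum_cons] <;> omega

-- Set.update only appends elements not already present
theorem update_append (t : List Char) : ∀ (s : PySem.Set Char),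
    ∃ d, PySem.Set.update s t = s ++ d ∧ ∀ x ∈ d, x ∉ s := by
  induction t with
  | nil => exact fun s => ⟨[], by simp [PySem.Set.update]⟩
  | cons y t ih =>
    intro s
    obtain ⟨d', hd', hni⟩ := ih (PySem.Set.add s y)
    by_cases hy : y ∈ s
    · refine ⟨d', ?_, fun x hx => ?_⟩
      · simpa [PySem.Set.update, PySem.Set.add, hy] using hd'
      · have := hni x hx
        simp [PySem.Set.add, hy] at this
        exact this
    · refine ⟨y :: d', ?_, fun x hx => ?_⟩
      · have : PySem.Set.add s y = s ++ [y] := by simp [PySem.Set.add, hy]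
        simpa [PySem.Set.update, this] using hd'
      · rcases List.mem_cons.mp hx with rfl | hx
        · exact hy
        · have := hni x hx
          simp [PySem.Set.add, hy] at this
          exact fun hxs => this.1 hxs

-- per-triple equality: intersection sum = frequency-table (count = 3) sum
theorem chunk_eq (a b c : List Char) :
    ((((PySem.Set.ofList a ++ PySem.Set.ofList b ++ PySem.Set.ofList c).foldl
        (fun d x => d.insert x (d.getD x 0 + 1)) PySem.Dict.empty : PySem.Dict Char Int)).items.foldl
        (fun sc p => if p.2 == 3 then sc + get_priority p.1 else sc) (0:Int))
      = ((PySem.Set.inter (PySem.Set.inter (PySem.Set.ofList a) (PySem.Set.ofList b))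
            (PySem.Set.ofList c)).map get_priority).sum := by
  set s1 := PySem.Set.ofList a with hs1
  set s2 := PySem.Set.ofList b with hs2
  set s3 := PySem.Set.ofList c with hs3
  have n1 : s1.Nodup := PySem.Set.nodup_ofList a
  have n2 : s2.Nodup := PySem.Set.nodup_ofList b
  have n3 : s3.Nodup := PySem.Set.nodup_ofList c
  simp only [PySem.Dict.foldl_insert_getD_add_one_eq_counter]
  rw [foldl_if_add, zero_add, PySem.Dict.items_counter, List.filter_map, List.map_map]
  -- the filtered key list equals the intersection list
  have hkeys :
      (PySem.Set.ofList (s1 ++ s2 ++ s3)).filter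
          (fun k => (((s1 ++ s2 ++ s3).count k : Int) == 3))
        = PySem.Set.inter (PySem.Set.inter s1 s2) s3 := by
    have hofl : PySem.Set.ofList (s1 ++ s2 ++ s3) = PySem.Set.update s1 (s2 ++ s3) := by
      rw [List.append_assoc]
      show List.foldl PySem.Set.add PySem.Set.empty (s1 ++ (s2 ++ s3)) = _
      rw [List.foldl_append,
          show List.foldl PySem.Set.add PySem.Set.empty s1 = PySem.Set.ofList s1 from rfl,
          PySem.Set.ofList_eq_self_of_nodup s1 n1]
      rfl
    have one : ∀ (l : List Char), l.Nodup → ∀ k, ((l.count k : Int)) = if k ∈ l then 1 else 0 := by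
      intro l hl k
      by_cases h : k ∈ l
      · simp [h, List.count_eq_one_of_mem hl h]
      · simp [h, List.count_eq_zero_of_not_mem h]
    have cnt : ∀ k, (((s1 ++ s2 ++ s3).count k : Int))
        = (if k ∈ s1 then 1 else 0) + (if k ∈ s2 then 1 else 0) + (if k ∈ s3 then 1 else 0) := by
      intro k
      rw [List.count_append, List.count_append]
      push_cast
      rw [one s1 n1 k, one s2 n2 k, one s3 n3 k]
    obtain ⟨d, hd, hni⟩ := update_append (s2 ++ s3) s1
    rw [hofl, hd, List.filter_append]
    have hdnil : d.filter (fun k => (((s1 ++ s2 ++ s3).count k : Int) == 3)) = [] := by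
      rw [List.filter_eq_nil_iff]
      intro x hx
      have hx1 : x ∉ s1 := hni x hx
      simp only [cnt x, if_neg hx1, beq_iff_eq]
      split_ifs <;> omega
    rw [hdnil, List.append_nil]
    have hcg : ∀ k ∈ s1, ((((s1 ++ s2 ++ s3).count k : Int) == 3))
        = (s2.contains k && s3.contains k) := by
      intro k hk
      rw [show (((s1 ++ s2 ++ s3).count k : Int) == 3)
            = (((if k ∈ s1 then 1 else 0) + (if k ∈ s2 then 1 else 0)
                + (if k ∈ s3 then (1:Int) else 0)) == 3) from by rw [cnt k]]
      by_cases h2 : k ∈ s2 <;> by_cases h3 : k ∈ s3 <;> simp [hk, h2, h3]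
    rw [List.filter_congr hcg]
    simp [PySem.Set.inter, List.filter_filter, Bool.and_comm]
  simp only [Function.comp_def]
  rw [hkeys]

-- outer loops agree given the per-triple equality
theorem outer_eq (F : Int → List Char) (C : Int → List (Char × Int))
    (h : ∀ i, (C i).foldl (fun sc p => if p.2 == 3 then sc + get_priority p.1 else sc) (0:Int)
          = ((F i).map get_priority).sum) (l : List Int) :
    ∀ (acc : List Char) (s : Int), s = (acc.map get_priority).sum →
      l.foldl (fun sc i =>
          (C i).foldl (fun sc p => if p.2 == 3 then sc + get_priority p.1 else sc) sc) s
        = ((l.foldl (fun a i => a ++ F i) acc).map get_priority).sum := by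
  induction l with
  | nil => intro acc s hs; simpa using hs
  | cons i t ih =>
    intro acc s hs
    simp only [List.foldl_cons]
    refine ih (acc ++ F i) _ ?_
    have h0 := h i
    rw [foldl_if_add, zero_add] at h0
    rw [foldl_if_add, h0, hs, List.map_append, List.sum_append]

-- ===== VERDICT (by name: the statement is the Claim_ definition above) =====
theorem part2_spec : Claim_equal_part2 := by
  intro data _ _
  unfold Spec_part2 part2 part2_alt
  simp only []
  symm
  refine outer_eq _ _ (fun i => ?_) _ [] 0 (by simp)
  exact chunk_eq (PySem.List.pyGetD data i "").toList
    (PySem.List.pyGetD data (i+1) "").toList (PySem.List.pyGetD data (i+2) "").toList
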